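-- pv_equiv track=rewrite | github.com/chuanminglu/aidocs | src/md2doc/engines/plantuml_engine.py | validate_chart
-- ===== SOURCE A (Python) =====
-- from typing import Optional, Tuple
--
-- def validate_chart(chart_code: str) -> Tuple[bool, Optional[str]]:
--     """验证PlantUML图表代码
--
--     Args:
--         chart_code: 图表代码
--
--     Returns:
--         (是否有效, 错误信息)
--     """
--     if not chart_code.strip():
--         return False, "图表代码为空"
--
--     # 基本语法检查
--     lines = chart_code.strip().split('\n')
--     has_start = any(line.strip().startswith('@start') for line in lines)
--     has_end = any(line.strip().startswith('@end') for line in lines)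
--
--     if not (has_start and has_end):
--         return False, "PlantUML代码缺少@start或@end标记"
--
--     return True, None
-- ===== SOURCE B (Python) =====
-- def validate_chart(chart_code):
--     """Character-level scanner over the stripped text: one walk tracking whether we
--     are at the (whitespace-only) start of a line, matching '@start'/'@end' in place
--     instead of splitting into lines and stripping each one."""
--     s = chart_code.strip()
--     if not s:
--         return False, "图表代码为空"
--     has_start = False
--     has_end = False
--     at_line_start = True
--     for i, ch in enumerate(s):
--         if ch == '\n':
--             at_line_start = True
--         elif ch in ' \t\r':   # line-internal whitespace on the task's ASCII domain
--             pass
--         else: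
--             if at_line_start and ch == '@':
--                 if s.startswith('start', i + 1):
--                     has_start = True
--                 if s.startswith('end', i + 1):
--                     has_end = True
--             at_line_start = False
--     if has_start and has_end:
--         return True, None
--     return False, "PlantUML代码缺少@start或@end标记"
-- ===== Notes on version B (the rewrite author's own statement) =====
-- stated objective: alternative
-- what changed: Instead of splitting into lines, stripping each line and running two any() scans, B walks the stripped text once character by character with an at-line-start flag and matches '@start'/'@end' in place at line starts.
import Mathlib
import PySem

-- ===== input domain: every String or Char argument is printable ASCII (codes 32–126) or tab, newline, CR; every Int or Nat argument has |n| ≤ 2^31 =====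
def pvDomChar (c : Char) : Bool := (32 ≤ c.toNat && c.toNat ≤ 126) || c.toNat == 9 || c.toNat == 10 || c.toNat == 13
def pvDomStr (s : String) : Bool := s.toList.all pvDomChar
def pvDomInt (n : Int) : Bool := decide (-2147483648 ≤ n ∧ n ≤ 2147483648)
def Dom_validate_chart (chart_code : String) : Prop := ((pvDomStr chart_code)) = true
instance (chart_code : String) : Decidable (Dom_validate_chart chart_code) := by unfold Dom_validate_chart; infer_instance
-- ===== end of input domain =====

-- B replaces A's split-into-lines + per-line strip + two any() scans by a single character-level
-- scan of the stripped text that matches '@start'/'@end' in place at line starts; same return values.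
-- ===== PORT A =====
-- strings are handled as their character lists (PySem.Chars is PySem.Str on .toList; exact on the ASCII domain)
def validate_chart (chart_code : String) : Bool × Option String :=
  if PySem.Chars.strip chart_code.toList = [] then (false, some "图表代码为空")
  else
    let lines := PySem.Chars.splitOn (PySem.Chars.strip chart_code.toList) "\n".toList
    let has_start := lines.any (fun line => PySem.Chars.startswith (PySem.Chars.strip line) "@start".toList)
    let has_end := lines.any (fun line => PySem.Chars.startswith (PySem.Chars.strip line) "@end".toList)
    if !(has_start && has_end) then (false, some "PlantUML代码缺少@start或@end标记")
    else (true, none)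

-- ===== PORT B =====
-- B's scanner: one pass over the characters; atStart = "only whitespace since the last newline";
-- at an '@' in that state, match 'start'/'end' against the rest of the text in place.
-- (the explicit ' '/'\t'/'\r' whitespace test is exact on the task's ASCII domain)
def vcScan : List Char → Bool → Bool → Bool → Bool × Bool
  | [], _, hs, he => (hs, he)
  | c :: rest, atStart, hs, he =>
    if c = '\n' then vcScan rest true hs he
    else if c = ' ' ∨ c = '\t' ∨ c = '\r' then vcScan rest atStart hs he
    else
      let hs := if atStart && decide (c = '@') && PySem.Chars.startswith rest "start".toList then true else hs
      let he := if atStart && decide (c = '@') && PySem.Chars.startswith rest "end".toList then true else he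
      vcScan rest false hs he

def validate_chart_alt (chart_code : String) : Bool × Option String :=
  let s := PySem.Chars.strip chart_code.toList
  if s = [] then (false, some "图表代码为空")
  else
    let r := vcScan s true false false
    if r.1 && r.2 then (true, none)
    else (false, some "PlantUML代码缺少@start或@end标记")

-- ===== PRECONDITION & SPEC =====
def Spec_validate_chart (chart_code : String) (out : Bool × Option String) : Prop := out = validate_chart_alt chart_code
instance (chart_code : String) (out : Bool × Option String) : Decidable (Spec_validate_chart chart_code out) := by unfold Spec_validate_chart; infer_instance

-- ===== CLAIM =====
def Claim_equal_validate_chart : Prop := ∀ (chart_code : String), Dom_validate_chart chart_code → Spec_validate_chart chart_code (validate_chart chart_code)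

-- ===== LEMMAS AND PROOFS =====
-- structural form of str.split('\n')
def vcSplit : List Char → List (List Char)
  | [] => [[]]
  | c :: l => if c = '\n' then [] :: vcSplit l else (c :: (vcSplit l).headI) :: (vcSplit l).tail

lemma vcSplit_ne_nil (l : List Char) : vcSplit l ≠ [] := by
  cases l with
  | nil => simp [vcSplit]
  | cons c l => unfold vcSplit; split_ifs <;> simp

lemma go_eq : ∀ (fuel : Nat) (l cur : List Char) (acc : List (List Char)), l.length < fuel →
    PySem.Chars.splitOn.go ['\n'] fuel l cur acc
      = acc.reverse ++ ((cur.reverse ++ (vcSplit l).headI) :: (vcSplit l).tail) := by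
  intro fuel
  induction fuel with
  | zero => intro l cur acc h; omega
  | succ fuel ih =>
    intro l cur acc h
    cases l with
    | nil => simp [PySem.Chars.splitOn.go, vcSplit]
    | cons c rest =>
      by_cases hc : c = '\n'
      · subst hc
        have hpre : List.isPrefixOf ['\n'] ('\n' :: rest) = true := by
          simp [List.isPrefixOf]
        rw [show PySem.Chars.splitOn.go ['\n'] (fuel + 1) ('\n' :: rest) cur acc
              = PySem.Chars.splitOn.go ['\n'] fuel (List.drop (['\n'] : List Char).length ('\n' :: rest)) [] (cur.reverse :: acc) from by
            simp [PySem.Chars.splitOn.go, hpre]]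
        rw [ih _ _ _ (by simp at h ⊢; omega)]
        cases hsp : vcSplit rest with
        | nil => exact absurd hsp (vcSplit_ne_nil rest)
        | cons a t => simp [vcSplit, hsp]
      · have hne : ('\n' == c) = false := beq_eq_false_iff_ne.mpr fun h => hc h.symm
        have hpre : List.isPrefixOf ['\n'] (c :: rest) = false := by
          simp [List.isPrefixOf, hne]
        rw [show PySem.Chars.splitOn.go ['\n'] (fuel + 1) (c :: rest) cur acc
              = PySem.Chars.splitOn.go ['\n'] fuel rest (c :: cur) acc from by
            simp [PySem.Chars.splitOn.go, hpre]]
        rw [ih _ _ _ (by simp at h ⊢; omega)]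
        simp [vcSplit, hc]

lemma splitOn_nl (l : List Char) : PySem.Chars.splitOn l "\n".toList = vcSplit l := by
  have h := go_eq (l.length + 1) l [] [] (by omega)
  have hne := vcSplit_ne_nil l
  show PySem.Chars.splitOn.go "\n".toList (l.length + 1) l [] [] = vcSplit l
  rw [show "\n".toList = ['\n'] from by simp, h]
  cases hsp : vcSplit l with
  | nil => exact absurd hsp hne
  | cons a t => simp

lemma headI_vcSplit (l : List Char) : (vcSplit l).headI = l.takeWhile (· ≠ '\n') := by
  induction l with
  | nil => simp [vcSplit]
  | cons c l ih => by_cases h : c = '\n' <;> simp [vcSplit, h, List.takeWhile, ih]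

-- a '\n'-free pattern is a prefix of the first line iff it is a prefix of the whole text
lemma prefix_takeWhile (p l : List Char) (hp : ∀ a ∈ p, a ≠ '\n') :
    p.isPrefixOf (l.takeWhile (· ≠ '\n')) = p.isPrefixOf l := by
  induction p generalizing l with
  | nil => simp [List.isPrefixOf]
  | cons a p ih =>
    cases l with
    | nil => simp [List.takeWhile, List.isPrefixOf]
    | cons c l =>
      by_cases hc : c = '\n'
      · subst hc
        have : a ≠ '\n' := hp a (by simp)
        simp [List.takeWhile, List.isPrefixOf, this]
      · have h2 := ih l (fun a ha => hp a (by simp [ha]))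
        simp only [ne_eq, decide_not] at h2 ⊢
        simp [List.takeWhile, List.isPrefixOf, hc, h2]

lemma rstrip_prefix (s : List Char) : PySem.Chars.rstrip s <+: s := by
  have h := (List.dropWhile_suffix (l := s.reverse) (p := PySem.Chars.isspace)).reverse
  simpa [PySem.Chars.rstrip] using h

-- trailing-whitespace removal does not affect a whitespace-free prefix
lemma prefix_rstrip (p s : List Char) (hp : ∀ a ∈ p, PySem.Chars.isspace a = false) :
    p.isPrefixOf (PySem.Chars.rstrip s) = p.isPrefixOf s := by
  rw [Bool.eq_iff_iff]
  simp only [List.isPrefixOf_iff_prefix]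
  constructor
  · intro h; exact h.trans (rstrip_prefix s)
  · rintro ⟨r, rfl⟩
    simp only [PySem.Chars.rstrip, List.reverse_append]
    rw [List.dropWhile_append]
    by_cases hall : (List.dropWhile PySem.Chars.isspace r.reverse).isEmpty = true
    · rw [if_pos hall]
      cases hpr : p.reverse with
      | nil =>
        have : p = [] := by simpa using congrArg List.reverse hpr
        simp [this]
      | cons a t =>
        have ha : a ∈ p := by
          have : a ∈ p.reverse := by simp [hpr]
          simpa using this
        rw [List.dropWhile_cons, hp a ha]
        simp [← hpr]
    · rw [if_neg hall]
      simp only [List.reverse_append, List.reverse_reverse]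
      exact List.prefix_append _ _
lemma startswith_strip (p s : List Char) (hp : ∀ a ∈ p, PySem.Chars.isspace a = false) :
    PySem.Chars.startswith (PySem.Chars.strip s) p = PySem.Chars.startswith (PySem.Chars.lstrip s) p := by
  simp [PySem.Chars.strip, PySem.Chars.startswith, prefix_rstrip p _ hp]

lemma strip_subset (l : List Char) : ∀ c ∈ PySem.Chars.strip l, c ∈ l := by
  intro c hc
  have h1 : c ∈ PySem.Chars.lstrip l := (rstrip_prefix _).subset hc
  exact (List.dropWhile_sublist (l := l) (p := PySem.Chars.isspace)).subset h1

lemma dom_nonspace (c : Char) (hd : pvDomChar c = true)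
    (h1 : ¬ c = ' ') (h2 : ¬ c = '\t') (h3 : ¬ c = '\r') (h4 : ¬ c = '\n') :
    PySem.Chars.isspace c = false := by
  have e1 : c.toNat ≠ 32 := fun h => h1 (Char.ext (by
    have : c.val.toNat = 32 := h
    have h32 : (' ' : Char).val.toNat = 32 := rfl
    exact UInt32.toNat_inj.mp (by rw [this, h32])))
  have e2 : c.toNat ≠ 9 := fun h => h2 (Char.ext (by
    have : c.val.toNat = 9 := h
    exact UInt32.toNat_inj.mp (by rw [this]; rfl)))
  have e3 : c.toNat ≠ 13 := fun h => h3 (Char.ext (by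
    have : c.val.toNat = 13 := h
    exact UInt32.toNat_inj.mp (by rw [this]; rfl)))
  have e4 : c.toNat ≠ 10 := fun h => h4 (Char.ext (by
    have : c.val.toNat = 10 := h
    exact UInt32.toNat_inj.mp (by rw [this]; rfl)))
  simp only [pvDomChar, Bool.or_eq_true, Bool.and_eq_true, decide_eq_true_eq, beq_iff_eq] at hd
  simp only [PySem.Chars.isspace, Bool.or_eq_false_iff, Bool.and_eq_false_iff,
             decide_eq_false_iff_not, not_le]
  omega

-- the scan invariant: from a line start the scan decides "some remaining line, stripped,
-- starts with @start / @end"; mid-line it decides the same for the following lines only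
lemma ns_start : ∀ a ∈ '@' :: "start".toList, PySem.Chars.isspace a = false := by
  intro a ha
  simp at ha
  rcases ha with rfl | rfl | rfl | rfl | rfl | rfl <;> decide

lemma ns_end : ∀ a ∈ '@' :: "end".toList, PySem.Chars.isspace a = false := by
  intro a ha
  simp at ha
  rcases ha with rfl | rfl | rfl | rfl <;> decide

lemma nl_start : ∀ a ∈ "start".toList, a ≠ '\n' := by
  intro a ha
  simp at ha
  rcases ha with rfl | rfl | rfl | rfl | rfl <;> decide

lemma nl_end : ∀ a ∈ "end".toList, a ≠ '\n' := by
  intro a ha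
  simp at ha
  rcases ha with rfl | rfl | rfl <;> decide

lemma toList_at_start : "@start".toList = '@' :: "start".toList := by simp

lemma toList_at_end : "@end".toList = '@' :: "end".toList := by simp

lemma vcScan_eq (cs : List Char) (hdom : ∀ c ∈ cs, pvDomChar c = true) :
    (∀ hs he, vcScan cs true hs he
      = (hs || (vcSplit cs).any (fun l => PySem.Chars.startswith (PySem.Chars.strip l) "@start".toList),
         he || (vcSplit cs).any (fun l => PySem.Chars.startswith (PySem.Chars.strip l) "@end".toList))) ∧
    (∀ hs he, vcScan cs false hs he
      = (hs || (vcSplit cs).tail.any (fun l => PySem.Chars.startswith (PySem.Chars.strip l) "@start".toList),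
         he || (vcSplit cs).tail.any (fun l => PySem.Chars.startswith (PySem.Chars.strip l) "@end".toList))) := by
  induction cs with
  | nil =>
    constructor <;> intro hs he <;>
      simp [vcScan, vcSplit, PySem.Chars.strip, PySem.Chars.lstrip, PySem.Chars.rstrip,
            PySem.Chars.startswith]
  | cons c l ih =>
    have ih' := ih (fun a ha => hdom a (List.mem_cons_of_mem _ ha))
    have hdc : pvDomChar c = true := hdom c List.mem_cons_self
    by_cases hc : c = '\n'
    · subst hc
      have hsp : vcSplit ('\n' :: l) = [] :: vcSplit l := by simp [vcSplit]
      have hn1 : PySem.Chars.startswith (PySem.Chars.strip []) ['@', 's', 't', 'a', 'r', 't'] = false := by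
        simp [PySem.Chars.strip, PySem.Chars.lstrip, PySem.Chars.rstrip,
              PySem.Chars.startswith]
      have hn2 : PySem.Chars.startswith (PySem.Chars.strip []) ['@', 'e', 'n', 'd'] = false := by
        simp [PySem.Chars.strip, PySem.Chars.lstrip, PySem.Chars.rstrip,
              PySem.Chars.startswith]
      constructor <;> intro hs he <;>
        simp [vcScan, hsp, ih'.1 hs he, hn1, hn2]
    · -- c ≠ '\n': vcSplit (c :: l) = (c :: h) :: t  with  vcSplit l = h :: t
      obtain ⟨h, t, hsp⟩ : ∃ h t, vcSplit l = h :: t := by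
        cases hx : vcSplit l with
        | nil => exact absurd hx (vcSplit_ne_nil l)
        | cons a b => exact ⟨a, b, rfl⟩
      have hsp' : vcSplit (c :: l) = (c :: h) :: t := by simp [vcSplit, hc, hsp]
      by_cases hws : c = ' ' ∨ c = '\t' ∨ c = '\r'
      · -- line-internal whitespace: stripping erases it from the head line
        have hspace : PySem.Chars.isspace c = true := by
          rcases hws with h | h | h <;> subst h <;> decide
        have hstrip : ∀ p, PySem.Chars.startswith (PySem.Chars.strip (c :: h)) p
            = PySem.Chars.startswith (PySem.Chars.strip h) p := by
          intro p
          simp [PySem.Chars.strip, PySem.Chars.lstrip, hspace]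
        constructor <;> intro hs he
        · rw [show vcScan (c :: l) true hs he = vcScan l true hs he from by
            simp [vcScan, hc, hws]]
          rw [ih'.1 hs he, hsp', hsp]
          simp [hstrip]
        · rw [show vcScan (c :: l) false hs he = vcScan l false hs he from by
            simp [vcScan, hc, hws]]
          rw [ih'.2 hs he, hsp', hsp]
          simp
      · -- visible character: it is the first character of the stripped head line
        simp only [not_or] at hws
        have hnsp : PySem.Chars.isspace c = false :=
          dom_nonspace c hdc hws.1 hws.2.1 hws.2.2 hc
        have hhead : h = l.takeWhile (· ≠ '\n') := by
          have := headI_vcSplit l; rw [hsp] at this; simpa using this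
        have hkey : ∀ (p0 : Char) (p : List Char), (∀ a ∈ p0 :: p, PySem.Chars.isspace a = false) →
            (∀ a ∈ p, a ≠ '\n') →
            PySem.Chars.startswith (PySem.Chars.strip (c :: h)) (p0 :: p)
              = (decide (c = p0) && p.isPrefixOf l) := by
          intro p0 p hpns hpnl
          rw [startswith_strip _ _ hpns]
          have hl : PySem.Chars.lstrip (c :: h) = c :: h := by
            simp [PySem.Chars.lstrip, hnsp]
          rw [hl]
          show List.isPrefixOf (p0 :: p) (c :: h) = _
          simp only [List.isPrefixOf]
          rw [hhead, prefix_takeWhile p l hpnl]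
          by_cases hpc : p0 = c
          · subst hpc; simp
          · have h1 : (p0 == c) = false := beq_eq_false_iff_ne.mpr hpc
            have h2 : decide (c = p0) = false := decide_eq_false fun h => hpc h.symm
            simp [h1, h2]
      -- assemble
        have hst : PySem.Chars.startswith (PySem.Chars.strip (c :: h)) "@start".toList
            = (decide (c = '@') && PySem.Chars.startswith l "start".toList) := by
          rw [toList_at_start]
          exact hkey '@' _ ns_start nl_start
        have hen : PySem.Chars.startswith (PySem.Chars.strip (c :: h)) "@end".toList
            = (decide (c = '@') && PySem.Chars.startswith l "end".toList) := by
          rw [toList_at_end]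
          exact hkey '@' _ ns_end nl_end
        constructor <;> intro hs he
        · rw [show vcScan (c :: l) true hs he
              = vcScan l false
                  (if decide (c = '@') && PySem.Chars.startswith l "start".toList then true else hs)
                  (if decide (c = '@') && PySem.Chars.startswith l "end".toList then true else he) from by
            simp [vcScan, hc, hws]]
          rw [ih'.2 _ _, hsp', hsp]
          simp only [List.any_cons, List.tail_cons, hst, hen, Prod.mk.injEq]
          constructor
          · cases (decide (c = '@') && PySem.Chars.startswith l "start".toList) <;>
              cases hs <;> simp
          · cases (decide (c = '@') && PySem.Chars.startswith l "end".toList) <;>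
              cases he <;> simp
        · rw [show vcScan (c :: l) false hs he = vcScan l false hs he from by
            simp [vcScan, hc, hws]]
          rw [ih'.2 hs he, hsp', hsp]
          simp

-- ===== VERDICT =====
theorem validate_chart_spec : Claim_equal_validate_chart := by
  intro chart_code hdom
  unfold Spec_validate_chart validate_chart validate_chart_alt
  by_cases h : PySem.Chars.strip chart_code.toList = []
  · simp [h]
  · have hdom' : ∀ c ∈ PySem.Chars.strip chart_code.toList, pvDomChar c = true := by
      intro c hc
      have hd : pvDomStr chart_code = true := hdom
      simp only [pvDomStr, List.all_eq_true] at hd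
      exact hd c (strip_subset _ c hc)
    have hsc := (vcScan_eq _ hdom').1 false false
    simp only [h, if_false, splitOn_nl, hsc]
    by_cases hs : (vcSplit (PySem.Chars.strip chart_code.toList)).any
        (fun l => PySem.Chars.startswith (PySem.Chars.strip l) "@start".toList) = true <;>
      by_cases he : (vcSplit (PySem.Chars.strip chart_code.toList)).any
        (fun l => PySem.Chars.startswith (PySem.Chars.strip l) "@end".toList) = true <;>
      simp_all
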